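-- pv_equiv track=rewrite | github.com/AtomicLeap/Data-Strutures-and-Algorithms | Leetcode Solutions/leetcode_693.py | binary_has_alt_bits2
-- ===== SOURCE A (Python) =====
-- def binary_has_alt_bits2(n: int) -> bool:
--     prev = n & 1
--     n >>= 1
--
--     while n:
--         curr = n & 1
--         if curr == prev:
--             return False
--         prev = curr
--         n >>= 1
--
--     return True
-- ===== SOURCE B (Python) =====
-- def binary_has_alt_bits2(n: int) -> bool:
--     if n < 0:
--         return False
--     m = n ^ (n >> 1)
--     return m & (m + 1) == 0
-- ===== Notes on version B (the rewrite author's own statement) =====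
-- stated objective: faster
-- what changed: Replaces the bit-by-bit scanning loop with the closed-form bit trick: m = n ^ (n >> 1) is all ones (m & (m+1) == 0) exactly when n's bits alternate; negative n yields False as in A.
import Mathlib
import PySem

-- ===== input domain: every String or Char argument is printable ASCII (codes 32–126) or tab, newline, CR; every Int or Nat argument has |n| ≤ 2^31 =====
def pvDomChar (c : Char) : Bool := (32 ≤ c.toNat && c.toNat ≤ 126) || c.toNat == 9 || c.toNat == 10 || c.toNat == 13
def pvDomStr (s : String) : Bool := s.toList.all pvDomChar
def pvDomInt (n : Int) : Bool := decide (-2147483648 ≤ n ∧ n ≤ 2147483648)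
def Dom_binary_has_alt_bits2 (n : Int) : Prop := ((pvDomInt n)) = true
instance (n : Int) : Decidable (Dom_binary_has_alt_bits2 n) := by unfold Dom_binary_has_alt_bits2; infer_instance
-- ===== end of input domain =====

-- B replaces A's bit-scanning while-loop by the closed-form trick m = n ^ (n >> 1); m & (m+1) == 0.

-- ===== PORT A =====
-- arithmetic reading of Python's 'n >> 1'; cited by the termination proof of the loop below
theorem pvShiftOne (n : Int) : n >>> (1:Nat) = PySem.Int.floordiv n 2 := by
  rw [PySem.Int.floordiv_eq_ediv_of_pos (by norm_num)]
  cases n with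
  | ofNat m =>
    show Int.ofNat (m >>> 1) = _
    rw [Nat.shiftRight_eq_div_pow]
    simp only [Int.ofNat_eq_natCast]
    omega
  | negSucc m =>
    show Int.negSucc (m >>> 1) = _
    rw [Nat.shiftRight_eq_div_pow]
    simp only [Int.negSucc_eq]
    push_cast
    omega

-- the 'while n:' loop of A, state (prev, n)
def pvLoopA (prev n : Int) : Bool :=
  if n = 0 then true
  else
    if PySem.Int.band n 1 = prev then false
    else pvLoopA (PySem.Int.band n 1) (n >>> (1:Nat))
termination_by (if 0 ≤ n then n.toNat else 2 * n.natAbs + (if prev = 1 then 0 else 1))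
decreasing_by
  rename_i h0 hne
  rw [pvShiftOne, PySem.Int.band_one] at *
  have hq := PySem.Int.floordiv_mul_add_mod n 2
  have hr0 := PySem.Int.mod_nonneg n (b := 2) (by norm_num)
  have hr1 := PySem.Int.mod_lt n (b := 2) (by norm_num)
  split_ifs <;> omega

def binary_has_alt_bits2 (n : Int) : Bool :=
  pvLoopA (PySem.Int.band n 1) (n >>> (1:Nat))

-- ===== PORT B =====
def binary_has_alt_bits2_alt (n : Int) : Bool :=
  if n < 0 then false
  else
    let t := PySem.Int.bxor n (n >>> (1:Nat))
    decide (PySem.Int.band t (t + 1) = 0)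

-- ===== PRECONDITION & SPEC =====
def Spec_binary_has_alt_bits2 (n : Int) (out : Bool) : Prop := out = binary_has_alt_bits2_alt n
instance (n : Int) (out : Bool) : Decidable (Spec_binary_has_alt_bits2 n out) := by unfold Spec_binary_has_alt_bits2; infer_instance

-- ===== CLAIM (what is proved, stated in full; the proofs are below) =====
def Claim_equal_binary_has_alt_bits2 : Prop := ∀ (n : Int), Dom_binary_has_alt_bits2 n → Spec_binary_has_alt_bits2 n (binary_has_alt_bits2 n)

-- ===== LEMMAS AND PROOFS =====

-- A's loop returns False on every negative n (Python: the sign bit repeats forever)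
theorem pvLoopA_neg : ∀ (prev n : Int), n < 0 → pvLoopA prev n = false := by
  intro prev n
  induction prev, n using pvLoopA.induct with
  | case1 prev => intro h; omega
  | case2 n h0 => intro _; rw [pvLoopA.eq_def]; simp [h0]
  | case3 prev n h0 hb ih =>
    intro h
    rw [pvLoopA.eq_def]
    simp only [if_neg h0, if_neg hb]
    apply ih
    rw [pvShiftOne]
    have hq := PySem.Int.floordiv_mul_add_mod n 2
    have hr0 := PySem.Int.mod_nonneg n (b := 2) (by norm_num)
    have hr1 := PySem.Int.mod_lt n (b := 2) (by norm_num)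
    omega

-- cast/shift commutation for nonnegative arguments
theorem pvCastShiftOne (a : Nat) : ((a : Int) >>> (1 : Nat)) = ((a / 2 : Nat) : Int) := by
  rw [show ((a : Int) >>> (1 : Nat)) = ((a >>> 1 : Nat) : Int) from rfl, Nat.shiftRight_eq_div_pow]

-- the low bit of a Nat conjunction
theorem pvLandMod2 (a b : Nat) : (a &&& b) % 2 = (a % 2) &&& (b % 2) := by
  calc (a &&& b) % 2 = (a &&& b) &&& (1 &&& 1) := (Nat.and_one_is_mod _).symm
    _ = (a &&& 1) &&& (b &&& 1) := by ac_rfl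
    _ = (a % 2) &&& (b % 2) := by rw [Nat.and_one_is_mod, Nat.and_one_is_mod]

-- one unfolding step of the all-ones test t & (t+1) == 0
theorem pvAllOnesStep (t : Nat) (ht : t ≠ 0) :
    (t &&& (t + 1) = 0) ↔ (t % 2 = 1 ∧ (t / 2) &&& (t / 2 + 1) = 0) := by
  have hdecomp : t &&& (t + 1) = 2 * ((t / 2) &&& ((t + 1) / 2)) + ((t % 2) &&& ((t + 1) % 2)) := by
    conv_lhs => rw [← Nat.div_add_mod (t &&& (t + 1)) 2]
    rw [Nat.and_div_two, pvLandMod2]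
  rcases Nat.mod_two_eq_zero_or_one t with hp | hp
  · have h1 : (t + 1) % 2 = 1 := by omega
    have h2 : (t + 1) / 2 = t / 2 := by omega
    rw [hdecomp, hp, h1, h2]
    have : (0 &&& 1 : Nat) = 0 := rfl
    rw [this, Nat.and_self]
    omega
  · have h1 : (t + 1) % 2 = 0 := by omega
    have h2 : (t + 1) / 2 = t / 2 + 1 := by omega
    rw [hdecomp, hp, h1, h2]
    have : (1 &&& 0 : Nat) = 0 := rfl
    rw [this]
    omega

-- cast of band with the numeral 1
theorem pvBandCastOne (q : Nat) : PySem.Int.band (q : Int) 1 = ((q % 2 : Nat) : Int) := by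
  have : ((1 : Nat) : Int) = 1 := rfl
  rw [← this, PySem.Int.band_natCast, Nat.and_one_is_mod]

-- the heart: on nonnegative input, A's loop equals B's closed form, stated over Nat
theorem pvNatKey : ∀ (m : Nat),
    pvLoopA ((m % 2 : Nat) : Int) ((m / 2 : Nat) : Int)
      = decide ((m ^^^ m / 2) &&& ((m ^^^ m / 2) + 1) = 0) := by
  intro m
  induction m using Nat.strong_induction_on with
  | _ m ih =>
    by_cases hq : m / 2 = 0
    · have hm2 : m < 2 := by omega
      interval_cases m <;> rw [pvLoopA.eq_def] <;> decide
    · rw [pvLoopA.eq_def]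
      have hql : ((m / 2 : Nat) : Int) ≠ 0 := by exact_mod_cast hq
      rw [if_neg hql, pvBandCastOne]
      have ht0 : m ^^^ m / 2 ≠ 0 := by
        intro h
        have := Nat.xor_eq_zero_iff.mp h
        omega
      have hmod : (m ^^^ m / 2) % 2 = (m + m / 2) % 2 := Nat.xor_mod_two_eq
      have hdiv : (m ^^^ m / 2) / 2 = (m / 2) ^^^ (m / 2 / 2) := Nat.xor_div_two
      by_cases hp : m / 2 % 2 = m % 2
      · rw [if_pos (by exact_mod_cast hp)]
        have hodd : ¬ ((m ^^^ m / 2) % 2 = 1) := by omega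
        have : ¬ ((m ^^^ m / 2) &&& ((m ^^^ m / 2) + 1) = 0) := by
          intro h
          exact hodd ((pvAllOnesStep _ ht0).mp h).1
        simp [this]
      · rw [if_neg (by exact_mod_cast hp)]
        rw [pvCastShiftOne, ih (m / 2) (by omega)]
        have hodd : (m ^^^ m / 2) % 2 = 1 := by omega
        have : ((m ^^^ m / 2) &&& ((m ^^^ m / 2) + 1) = 0)
            ↔ ((m / 2 ^^^ m / 2 / 2) &&& ((m / 2 ^^^ m / 2 / 2) + 1) = 0) := by
          rw [pvAllOnesStep _ ht0, hdiv]
          tauto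
        simp only [decide_eq_decide]
        exact this.symm

-- ===== VERDICT (by name: the statement is the Claim_ definition above) =====
theorem binary_has_alt_bits2_spec : Claim_equal_binary_has_alt_bits2 := by
  intro n _
  unfold Spec_binary_has_alt_bits2 binary_has_alt_bits2 binary_has_alt_bits2_alt
  by_cases hn : n < 0
  · rw [if_pos hn]
    apply pvLoopA_neg
    rw [pvShiftOne]
    have hq := PySem.Int.floordiv_mul_add_mod n 2
    have hr0 := PySem.Int.mod_nonneg n (b := 2) (by norm_num)
    have hr1 := PySem.Int.mod_lt n (b := 2) (by norm_num)
    omega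
  · rw [if_neg hn]
    obtain ⟨m, rfl⟩ : ∃ m : Nat, n = (m : Int) := ⟨n.toNat, by omega⟩
    rw [pvCastShiftOne, pvBandCastOne, pvNatKey]
    show decide ((m ^^^ m / 2) &&& ((m ^^^ m / 2) + 1) = 0)
        = decide (PySem.Int.band (PySem.Int.bxor (m : Int) ((m / 2 : Nat) : Int))
            (PySem.Int.bxor (m : Int) ((m / 2 : Nat) : Int) + 1) = 0)
    rw [PySem.Int.bxor_natCast]
    rw [show ((m ^^^ m / 2 : Nat) : Int) + 1 = (((m ^^^ m / 2) + 1 : Nat) : Int) from by push_cast; ring]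
    rw [PySem.Int.band_natCast]
    simp only [decide_eq_decide]
    exact_mod_cast Iff.rfl
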